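-- pv_equiv track=rewrite | github.com/Jack-cpu666/refracting | app.py | _group_models_by_domain
-- ===== SOURCE A (Python) =====
-- from typing import Dict, List, Set, Tuple, Optional, Any, Union, Type, Callable
-- from collections import defaultdict, Counter, OrderedDict
--
-- def _group_models_by_domain(models: List) -> Dict[str, List]:
--     """Group models by domain context."""
--     groups = defaultdict(list)
--
--     for model in models:
--         # Simple grouping by name patterns
--         name = model['name'].lower()
--         if 'user' in name or 'auth' in name:
--             groups['auth'].append(model)
--         elif 'payment' in name or 'billing' in name:
--             groups['payment'].append(model)
--         elif 'product' in name or 'item' in name: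
--             groups['product'].append(model)
--         else:
--             groups['core'].append(model)
--
--     return dict(groups)
-- ===== SOURCE B (Python) =====
-- _RULES = [
--     (("user", "auth"), "auth"),
--     (("payment", "billing"), "payment"),
--     (("product", "item"), "product"),
-- ]
--
--
-- def _classify(name):
--     n = name.lower()
--     for keywords, category in _RULES:
--         if any(k in n for k in keywords):
--             return category
--     return "core"
--
--
-- def _group_models_by_domain(models):
--     cats = [_classify(m["name"]) for m in models]
--     order = list(dict.fromkeys(cats))
--     return {c: [m for m, cc in zip(models, cats) if cc == c] for c in order}
-- ===== Notes on version B (the rewrite author's own statement) =====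
-- stated objective: alternative
-- what changed: A is a single pass appending each model into a defaultdict bucket via an if/elif chain; B factors the classification into an ordered rule table, classifies all models in one map, and then builds the result dict by filtering the model list once per first-seen category.
import Mathlib
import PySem

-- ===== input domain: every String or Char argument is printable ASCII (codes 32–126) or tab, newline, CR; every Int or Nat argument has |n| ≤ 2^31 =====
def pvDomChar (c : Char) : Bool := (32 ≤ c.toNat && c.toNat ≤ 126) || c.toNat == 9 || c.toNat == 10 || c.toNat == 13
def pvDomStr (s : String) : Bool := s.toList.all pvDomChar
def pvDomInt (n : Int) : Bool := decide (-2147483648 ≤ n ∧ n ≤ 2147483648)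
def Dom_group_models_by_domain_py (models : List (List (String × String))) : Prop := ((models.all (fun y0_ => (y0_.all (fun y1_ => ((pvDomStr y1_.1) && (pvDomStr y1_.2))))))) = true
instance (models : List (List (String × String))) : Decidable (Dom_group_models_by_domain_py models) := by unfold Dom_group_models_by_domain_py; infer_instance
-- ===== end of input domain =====

-- B replaces A's defaultdict-append pass and inline if/elif chain by an ordered rule table,
-- a classification map over the models and one filter pass per first-seen category (objective: alternative).


-- ===== PORT A =====
-- literal transliteration of A: one fold over the models; each step looks up model['name'],
-- lowercases it, runs the if/elif substring chain and appends the model to that bucket of the dict.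
-- (model['name'] is ported as getD … ""; Pre_ guarantees the key is present, so the default is never used.)
def group_models_by_domain_py (models : List (List (String × String))) : List (String × List (List (String × String))) :=
  (models.foldl (fun groups model =>
    let name := PySem.Str.lower (PySem.Dict.getD (PySem.Dict.mk model) "name" "")
    if PySem.Str.isIn "user" name || PySem.Str.isIn "auth" name then
      groups.insert "auth" (groups.getD "auth" [] ++ [model])
    else if PySem.Str.isIn "payment" name || PySem.Str.isIn "billing" name then
      groups.insert "payment" (groups.getD "payment" [] ++ [model])
    else if PySem.Str.isIn "product" name || PySem.Str.isIn "item" name then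
      groups.insert "product" (groups.getD "product" [] ++ [model])
    else
      groups.insert "core" (groups.getD "core" [] ++ [model]))
    PySem.Dict.empty).items

-- ===== PORT B =====
-- ordered rule table (= _RULES in Source B)
def pvRules : List (List String × String) :=
  [(["user", "auth"], "auth"), (["payment", "billing"], "payment"), (["product", "item"], "product")]

-- the first-match loop of _classify, recursion over the rule list
def pvFirstCat (n : String) : List (List String × String) → String
  | [] => "core"
  | (keywords, category) :: rest =>
    if keywords.any (fun k => PySem.Str.isIn k n) then category else pvFirstCat n rest

def pvClassify (name : String) : String := pvFirstCat (PySem.Str.lower name) pvRules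

-- _classify(m['name']) for one model
def pvKey (model : List (String × String)) : String :=
  pvClassify (PySem.Dict.getD (PySem.Dict.mk model) "name" "")

def group_models_by_domain_py_alt (models : List (List (String × String))) : List (String × List (List (String × String))) :=
  let cats := models.map pvKey
  let order := PySem.List.dedup cats
  order.map (fun c => (c, ((models.zip cats).filter (fun p => p.2 == c)).map (fun p => p.1)))

-- ===== PRECONDITION & SPEC =====
-- A raises KeyError on any model lacking a 'name' key; Pre_ requires every model to carry one.
def Pre_group_models_by_domain_py (models : List (List (String × String))) : Prop :=
  (models.all (fun m => m.any (fun p => p.1 == "name"))) = true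
instance (models : List (List (String × String))) : Decidable (Pre_group_models_by_domain_py models) := by unfold Pre_group_models_by_domain_py; infer_instance

def pvWitness_group_models_by_domain_py : (List (List (String × String))) :=
  [[("name", "UserProfile")], [("name", "cart item"), ("x", "y")], [("name", "PAYMENT")], [("name", "blog post")]]

def Spec_group_models_by_domain_py (models : List (List (String × String))) (out : List (String × List (List (String × String)))) : Prop := out = group_models_by_domain_py_alt models
instance (models : List (List (String × String))) (out : List (String × List (List (String × String)))) : Decidable (Spec_group_models_by_domain_py models out) := by unfold Spec_group_models_by_domain_py; infer_instance

-- ===== CLAIM (what is proved, stated in full; the proofs are below) =====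
def Claim_equal_group_models_by_domain_py : Prop := ∀ (models : List (List (String × String))), Dom_group_models_by_domain_py models → Pre_group_models_by_domain_py models → Spec_group_models_by_domain_py models (group_models_by_domain_py models)

-- ===== LEMMAS AND PROOFS =====

-- the bucket of category c after processing the models in `done`
def pvBucket (done : List (List (String × String))) (c : String) : List (List (String × String)) :=
  done.filter (fun m => pvKey m == c)

-- the dict A's loop has built after processing `done`
def pvSpecD (done : List (List (String × String))) : PySem.Dict String (List (List (String × String))) :=
  PySem.Dict.mk ((PySem.List.dedup (done.map pvKey)).map (fun c => (c, pvBucket done c)))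

-- A's loop body equals the generic "append to bucket pvKey model" step
theorem pvStep_eq (g : PySem.Dict String (List (List (String × String)))) (model : List (String × String)) :
    (let name := PySem.Str.lower (PySem.Dict.getD (PySem.Dict.mk model) "name" "")
     if PySem.Str.isIn "user" name || PySem.Str.isIn "auth" name then
       g.insert "auth" (g.getD "auth" [] ++ [model])
     else if PySem.Str.isIn "payment" name || PySem.Str.isIn "billing" name then
       g.insert "payment" (g.getD "payment" [] ++ [model])
     else if PySem.Str.isIn "product" name || PySem.Str.isIn "item" name then
       g.insert "product" (g.getD "product" [] ++ [model])
     else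
       g.insert "core" (g.getD "core" [] ++ [model]))
    = g.insert (pvKey model) (g.getD (pvKey model) [] ++ [model]) := by
  simp only [pvKey, pvClassify, pvRules, pvFirstCat, List.any_cons, List.any_nil, Bool.or_false]
  split_ifs <;> rfl

theorem pvGet?_mk_map (L : List String) (done : List (List (String × String))) (c : String) :
    (PySem.Dict.mk (L.map (fun c' => (c', pvBucket done c')))).get? c
      = if c ∈ L then some (pvBucket done c) else none := by
  induction L with
  | nil =>
    rw [if_neg (List.not_mem_nil)]
    rfl
  | cons x t ih =>
    rw [List.map_cons, PySem.Dict.get?_mk_cons, ih]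
    by_cases hx : x = c
    · simp [hx]
    · simp [hx, Ne.symm hx, beq_iff_eq]

theorem pvContains_mk_map (L : List String) (done : List (List (String × String))) (c : String) :
    (PySem.Dict.mk (L.map (fun c' => (c', pvBucket done c')))).contains c = decide (c ∈ L) := by
  rw [PySem.Dict.contains_eq_isSome_get?, pvGet?_mk_map]
  by_cases h : c ∈ L <;> simp [h]

theorem pvDedup_append (xs : List String) (x : String) :
    PySem.List.dedup (xs ++ [x])
      = if x ∈ PySem.List.dedup xs then PySem.List.dedup xs else PySem.List.dedup xs ++ [x] := by
  simp only [PySem.List.dedup_eq_ofList, PySem.Set.ofList_eq_foldl, List.foldl_append,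
    List.foldl_cons, List.foldl_nil]
  rw [PySem.Set.add]
  by_cases h : x ∈ xs.foldl PySem.Set.add []
  · have hc : PySem.Set.contains (xs.foldl PySem.Set.add []) x = true :=
      (PySem.Set.contains_iff _ _).mpr h
    rw [hc, if_pos rfl, if_pos h]
  · have hc : PySem.Set.contains (xs.foldl PySem.Set.add []) x = false := by
      cases hcc : PySem.Set.contains (xs.foldl PySem.Set.add []) x
      · rfl
      · exact absurd ((PySem.Set.contains_iff _ _).mp hcc) h
    rw [hc, if_neg (by simp), if_neg h]

theorem pvBucket_append (done : List (List (String × String))) (m : List (String × String)) (c : String) :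
    pvBucket (done ++ [m]) c = pvBucket done c ++ (if pvKey m == c then [m] else []) := by
  by_cases h : pvKey m == c
  · simp [pvBucket, h]
  · simp [pvBucket, h]

theorem pvBucket_nil_of_not_mem (done : List (List (String × String))) (c : String)
    (h : c ∉ done.map pvKey) : pvBucket done c = [] := by
  simp only [pvBucket, List.filter_eq_nil_iff]
  intro m hm hc
  exact h (List.mem_map.mpr ⟨m, hm, by simpa using hc⟩)

-- items of the spec dict, definitionally
theorem pvItems_spec (done : List (List (String × String))) :
    (pvSpecD done).items
      = (PySem.List.dedup (done.map pvKey)).map (fun c => (c, pvBucket done c)) := rfl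

-- the step lemma: one iteration of A's loop advances the spec dict by one model
theorem pvStep_spec (done : List (List (String × String))) (m : List (String × String)) :
    (pvSpecD done).insert (pvKey m) ((pvSpecD done).getD (pvKey m) [] ++ [m])
      = pvSpecD (done ++ [m]) := by
  set c := pvKey m with hc
  apply PySem.Dict.ext
  by_cases hmem : c ∈ PySem.List.dedup (done.map pvKey)
  · have hcont : (pvSpecD done).contains c = true := by
      rw [pvSpecD, pvContains_mk_map]; simpa using hmem
    have hget : (pvSpecD done).getD c [] = pvBucket done c := by
      rw [pvSpecD, PySem.Dict.getD_eq_get?_getD, pvGet?_mk_map, if_pos hmem]; rfl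
    have hded : PySem.List.dedup ((done ++ [m]).map pvKey)
        = PySem.List.dedup (done.map pvKey) := by
      rw [List.map_append, List.map_cons, List.map_nil, ← hc, pvDedup_append, if_pos hmem]
    rw [PySem.Dict.items_insert_of_contains _ _ hcont, hget,
      pvItems_spec done, pvItems_spec (done ++ [m]), hded, List.map_map]
    apply List.map_congr_left
    intro a _
    by_cases ha : a = c
    · subst ha
      simp [pvBucket_append, ← hc]
    · simp only [Function.comp]
      rw [if_neg (by simpa [beq_iff_eq] using ha)]
      rw [pvBucket_append, if_neg (by simpa [beq_iff_eq, hc] using Ne.symm ha), List.append_nil]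
  · have hcont : (pvSpecD done).contains c = false := by
      rw [pvSpecD, pvContains_mk_map]; simpa using hmem
    have hget : (pvSpecD done).getD c [] = [] :=
      PySem.Dict.getD_of_not_contains _ _ hcont
    have hnm : c ∉ done.map pvKey := by
      intro h; exact hmem (by rw [PySem.List.dedup_eq_ofList]; simpa [PySem.Set.mem_ofList] using h)
    have hded : PySem.List.dedup ((done ++ [m]).map pvKey)
        = PySem.List.dedup (done.map pvKey) ++ [c] := by
      rw [List.map_append, List.map_cons, List.map_nil, ← hc, pvDedup_append, if_neg hmem]
    rw [hget, PySem.Dict.items_insert_of_not_contains _ _ hcont,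
      pvItems_spec done, pvItems_spec (done ++ [m]), hded, List.map_append]
    congr 1
    · apply List.map_congr_left
      intro a ha
      have hane : a ≠ c := fun h => hmem (h ▸ ha)
      rw [pvBucket_append, if_neg (by simpa [beq_iff_eq, hc] using Ne.symm hane), List.append_nil]
    · rw [List.map_cons, List.map_nil, pvBucket_append,
        pvBucket_nil_of_not_mem done c hnm, if_pos (by simp [hc])]

-- the whole loop, by induction with a generalized processed prefix
theorem pvFoldl_spec (models done : List (List (String × String))) :
    models.foldl (fun g m => g.insert (pvKey m) (g.getD (pvKey m) [] ++ [m])) (pvSpecD done)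
      = pvSpecD (done ++ models) := by
  induction models generalizing done with
  | nil => simp
  | cons m t ih =>
    rw [List.foldl_cons, pvStep_spec, ih]
    simp

-- B's zip-filter-map pass computes pvBucket
theorem pvZip_filter (models : List (List (String × String))) (c : String) :
    (((models.zip (models.map pvKey)).filter (fun p => p.2 == c)).map (fun p => p.1))
      = pvBucket models c := by
  induction models with
  | nil => rfl
  | cons m t ih =>
    simp only [pvBucket, List.filter_cons] at ih ⊢
    simp only [List.map_cons, List.zip_cons_cons, List.filter_cons]
    by_cases h : pvKey m == c
    · simp [h, ih]
    · simp [h, ih]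

-- ===== VERDICT (by name: the statement is the Claim_ definition above) =====
theorem group_models_by_domain_py_spec : Claim_equal_group_models_by_domain_py := by
  intro models _ _
  show group_models_by_domain_py models = group_models_by_domain_py_alt models
  unfold group_models_by_domain_py group_models_by_domain_py_alt
  have hstep : (fun (groups : PySem.Dict String (List (List (String × String)))) model =>
      let name := PySem.Str.lower (PySem.Dict.getD (PySem.Dict.mk model) "name" "")
      if PySem.Str.isIn "user" name || PySem.Str.isIn "auth" name then
        groups.insert "auth" (groups.getD "auth" [] ++ [model])
      else if PySem.Str.isIn "payment" name || PySem.Str.isIn "billing" name then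
        groups.insert "payment" (groups.getD "payment" [] ++ [model])
      else if PySem.Str.isIn "product" name || PySem.Str.isIn "item" name then
        groups.insert "product" (groups.getD "product" [] ++ [model])
      else
        groups.insert "core" (groups.getD "core" [] ++ [model]))
      = fun g m => g.insert (pvKey m) (g.getD (pvKey m) [] ++ [m]) := by
    funext g m; exact pvStep_eq g m
  rw [hstep]
  have hempty : (PySem.Dict.empty : PySem.Dict String (List (List (String × String)))) = pvSpecD [] := rfl
  rw [hempty, pvFoldl_spec, List.nil_append]
  show (pvSpecD models).items = _
  rw [pvSpecD]
  have : (PySem.Dict.mk ((PySem.List.dedup (models.map pvKey)).map (fun c => (c, pvBucket models c)))).items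
      = (PySem.List.dedup (models.map pvKey)).map (fun c => (c, pvBucket models c)) := rfl
  rw [this]
  apply List.map_congr_left
  intro c _
  rw [pvZip_filter]
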